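-- pv_equiv track=rewrite | github.com/Vinavia/Crypto-Analyser | mod.py | sub_table
-- ===== SOURCE A (Python) =====
-- def residue(num,mod):
--     if not isinstance(num, int):
--         return 'Error(residue): Invalid num'
--     if mod < 1:
--         return 'Error(residue): Invalid mod'
--
--     residue = num % mod
--
--     return residue
--
-- def sub_table(m):
--     if not isinstance(m,int):
--         return 'Error(sub_table): Invalid mod'
--
--     if m < 1:
--         return 'Error(sub_table): Invalid mod'
--
--     table = []
--
--     for row in range(m):
--         table.append([])
--         for col in range(m):
--             table[row].append(residue(row - col,m))
--
--     return table
-- ===== SOURCE B (Python) =====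
-- def sub_table(m):
--     if not isinstance(m, int):
--         return 'Error(sub_table): Invalid mod'
--
--     if m < 1:
--         return 'Error(sub_table): Invalid mod'
--
--     row = [(-c) % m for c in range(m)]
--     table = []
--     for _ in range(m):
--         table.append(row)
--         row = [row[-1]] + row[:-1]
--
--     return table
-- ===== Notes on version B (the rewrite author's own statement) =====
-- stated objective: alternative
-- what changed: B computes only the first row with modular arithmetic and derives each subsequent row by rotating the previous one right by one position, instead of A's nested loops calling residue() for each of the m*m cells.
-- outside the precondition, e.g. on sub_table(0): A returns 'Error(sub_table): Invalid mod', B returns 'Error(sub_table): Invalid mod'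
import Mathlib
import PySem

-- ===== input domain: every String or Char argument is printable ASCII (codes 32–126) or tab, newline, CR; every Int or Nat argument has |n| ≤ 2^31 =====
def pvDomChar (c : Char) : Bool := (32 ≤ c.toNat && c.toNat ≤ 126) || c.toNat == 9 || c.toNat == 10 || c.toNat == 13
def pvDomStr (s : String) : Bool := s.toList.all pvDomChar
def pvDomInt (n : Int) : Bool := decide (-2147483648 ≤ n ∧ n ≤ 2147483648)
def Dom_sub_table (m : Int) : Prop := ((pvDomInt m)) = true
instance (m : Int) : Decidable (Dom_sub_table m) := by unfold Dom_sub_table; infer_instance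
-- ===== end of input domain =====

-- B replaces the per-cell residue computation by building the first row once and
-- rotating it right to obtain each following row (alternative algorithm, similar cost).
-- For m < 1 both Pythons return an error STRING (not a table), so Pre_ excludes m < 1.

-- ===== PORT A =====
-- residue: on the path used by sub_table (num an int, mod = m ≥ 1) it returns num % mod;
-- its error-string branches are unreachable there, so it is ported as the Int result.
def pvResidue (num mod : Int) : Int := PySem.Int.mod num mod

def sub_table (m : Int) : List (List Int) :=
  (PySem.List.pyRange 0 m 1).foldl
    (fun table row =>
      table ++ [(PySem.List.pyRange 0 m 1).foldl
                  (fun r col => r ++ [pvResidue (row - col) m]) []])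
    []

-- ===== PORT B =====
-- next_row = [row[-1]] + row[:-1]  (row is nonempty on every iteration since m ≥ 1)
def pvRotR (row : List Int) : List Int :=
  match row.getLast? with
  | some x => x :: row.dropLast
  | none => []

def sub_table_alt (m : Int) : List (List Int) :=
  let base := (PySem.List.pyRange 0 m 1).map (fun c => PySem.Int.mod (-c) m)
  ((PySem.List.pyRange 0 m 1).foldl
      (fun st _ => (st.1 ++ [st.2], pvRotR st.2)) (([] : List (List Int)), base)).1

-- ===== PRECONDITION & SPEC =====
-- Pre_ excludes m < 1, where both Pythons return the error string
-- 'Error(sub_table): Invalid mod' instead of a table (not a value of the declared type).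
def Pre_sub_table (m : Int) : Prop := 1 ≤ m
instance (m : Int) : Decidable (Pre_sub_table m) := by unfold Pre_sub_table; infer_instance

def pvWitness_sub_table : Int := (5)

def Spec_sub_table (m : Int) (out : List (List Int)) : Prop := out = sub_table_alt m
instance (m : Int) (out : List (List Int)) : Decidable (Spec_sub_table m out) := by unfold Spec_sub_table; infer_instance

-- ===== CLAIM (what is proved, stated in full; the proofs are below) =====
def Claim_equal_sub_table : Prop := ∀ (m : Int), Dom_sub_table m → Pre_sub_table m → Spec_sub_table m (sub_table m)

-- ===== LEMMAS AND PROOFS =====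

-- row k of the table, in closed form
def pvRow (m : Int) (k : Nat) : List Int :=
  (List.range m.toNat).map (fun c : Nat => PySem.Int.mod ((k : Int) - c) m)

-- appending one element at a time is map
theorem pv_foldl_push {α β : Type} (f : α → β) (l : List α) (acc : List β) :
    l.foldl (fun r x => r ++ [f x]) acc = acc ++ l.map f := by
  induction l generalizing acc with
  | nil => simp
  | cons x t ih => simp [List.foldl_cons, ih]

-- the rotation loop produces the orbit of f under pvRotR
theorem pv_loop {α : Type} (f : Nat → List Int) (h : ∀ k, pvRotR (f k) = f (k + 1)) :
    ∀ (l : List α) (k : Nat) (acc : List (List Int)),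
      l.foldl (fun st _ => (st.1 ++ [st.2], pvRotR st.2)) (acc, f k)
        = (acc ++ (List.range l.length).map (fun i => f (k + i)), f (k + l.length)) := by
  intro l
  induction l with
  | nil => intro k acc; simp
  | cons x t ih =>
    intro k acc
    simp only [List.foldl_cons, h k, ih (k + 1) (acc ++ [f k]), List.length_cons,
      Prod.mk.injEq]
    refine ⟨?_, congrArg f (by omega)⟩
    rw [List.range_succ_eq_map, List.map_cons, List.map_map, List.append_assoc,
      List.singleton_append, Nat.add_zero]
    congr 1
    congr 1
    exact List.map_congr_left fun i _ => congrArg f (by simp; omega)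

-- one right-rotation of row k is row k+1
theorem pv_rot_row (m : Int) (hm : 1 ≤ m) (k : Nat) :
    pvRotR (pvRow m k) = pvRow m (k + 1) := by
  obtain ⟨j, hj⟩ : ∃ j, m.toNat = j + 1 := ⟨m.toNat - 1, by omega⟩
  unfold pvRow
  rw [hj]
  have hlast : ((List.range (j + 1)).map (fun c : Nat => PySem.Int.mod ((k : Int) - c) m)).getLast?
      = some (PySem.Int.mod ((k : Int) - j) m) := by
    simp [List.range_succ]
  have hdrop : ((List.range (j + 1)).map (fun c : Nat => PySem.Int.mod ((k : Int) - c) m)).dropLast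
      = (List.range j).map (fun c : Nat => PySem.Int.mod ((k : Int) - c) m) := by
    simp [List.range_succ]
  rw [pvRotR, hlast, hdrop]
  rw [List.range_succ_eq_map, List.map_cons, List.map_map]
  refine congrArg₂ List.cons ?_ ?_
  · -- head: (k - j) % m = (k + 1) % m  since k - j = (k + 1) - m and m > 0
    rw [PySem.Int.mod_eq_emod_of_pos (by omega : (0:Int) < m),
        PySem.Int.mod_eq_emod_of_pos (by omega : (0:Int) < m)]
    have hkj : (k : Int) - j = ((k + 1 : Nat) : Int) - 0 - m := by push_cast; omega
    rw [hkj, Int.sub_emod_right]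
    norm_num
  · exact List.map_congr_left (fun c _ => by
      simp only [Function.comp_def]; congr 1; push_cast; omega)

-- the inner loop of A builds row r
theorem pv_row_eq (m : Int) (r : Int) :
    (PySem.List.pyRange 0 m 1).foldl (fun l col => l ++ [pvResidue (r - col) m]) []
      = (List.range m.toNat).map (fun c : Nat => PySem.Int.mod (r - c) m) := by
  rw [pv_foldl_push]
  rw [show PySem.List.pyRange 0 m 1 = (List.range m.toNat).map (fun k : Nat => (k : Int)) by
        simpa using PySem.List.pyRange_one 0 m]
  simp [pvResidue, List.map_map, Function.comp_def]

-- ===== VERDICT (by name: the statement is the Claim_ definition above) =====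
theorem sub_table_spec : Claim_equal_sub_table := by
  intro m _ hm
  have hr : PySem.List.pyRange 0 m 1 = (List.range m.toNat).map (fun k : Nat => (k : Int)) := by
    simpa using PySem.List.pyRange_one 0 m
  have hA : sub_table m = (List.range m.toNat).map (fun k => pvRow m k) := by
    unfold sub_table
    rw [pv_foldl_push (fun row =>
          (PySem.List.pyRange 0 m 1).foldl (fun r col => r ++ [pvResidue (row - col) m]) [])]
    simp only [List.nil_append]
    rw [List.map_congr_left (fun r _ => pv_row_eq m r), hr, List.map_map]
    exact List.map_congr_left (fun k _ => by simp only [Function.comp_def, pvRow])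
  have hbase : (PySem.List.pyRange 0 m 1).map (fun c => PySem.Int.mod (-c) m) = pvRow m 0 := by
    rw [hr, List.map_map]
    exact List.map_congr_left (fun c _ => by
      simp only [Function.comp_def]; congr 1; omega)
  have hB : sub_table_alt m = (List.range m.toNat).map (fun k => pvRow m k) := by
    have h0 : sub_table_alt m
        = ((PySem.List.pyRange 0 m 1).foldl (fun st _ => (st.1 ++ [st.2], pvRotR st.2))
            (([] : List (List Int)),
             (PySem.List.pyRange 0 m 1).map (fun c => PySem.Int.mod (-c) m))).1 := rfl
    rw [h0, hbase, pv_loop (pvRow m) (pv_rot_row m hm) (PySem.List.pyRange 0 m 1) 0 []]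
    simp [hr]
  unfold Spec_sub_table
  exact hA.trans hB.symm
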